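-- pv_equiv track=rewrite | github.com/marcnorth/LlmTokenFinder | src/llm_token_finder/token_finder.py | _tokens_start_with_string
-- ===== SOURCE A (Python) =====
-- def _tokens_start_with_string(tokens: list[str], string: str) -> int:
--     """
--     Check if the list of tokens starts with the given string. The string may span multiple tokens,
--     but MUST match a whole number of tokens, i.e. it cannot match a substring of a token.
--     Examples:
--     _tokens_start_with_string(["a", "b", "c"], "a") -> True
--     _tokens_start_with_string(["a", "b", "c"], "ab") -> True
--     _tokens_start_with_string(["ab"], "a") -> False
--     :param tokens: The list of tokens to check
--     :param string: The string to check for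
--     :return: The number of tokens that match the string, or -1 if the string does not match
--     """
--     string_to_check = ""
--     for token_index, token in enumerate(tokens):
--         string_to_check += token
--         if string_to_check == string:
--             return token_index + 1
--         elif not string.startswith(string_to_check):
--             return -1
--     return -1
-- ===== SOURCE B (Python) =====
-- def _tokens_start_with_string(tokens: list[str], string: str) -> int:
--     pos = 0
--     for i, token in enumerate(tokens):
--         if string[pos:pos + len(token)] != token:
--             return -1
--         pos += len(token)
--         if pos == len(string):
--             return i + 1
--     return -1
-- ===== Notes on version B (the rewrite author's own statement) =====
-- stated objective: alternative
-- what changed: Replaces the growing concatenation re-compared against the whole string each iteration with a running position and a single per-token slice comparison; avoids A's quadratic worst case on long matching prefixes, though random inputs mismatch early so measured times are similar.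
import Mathlib
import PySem

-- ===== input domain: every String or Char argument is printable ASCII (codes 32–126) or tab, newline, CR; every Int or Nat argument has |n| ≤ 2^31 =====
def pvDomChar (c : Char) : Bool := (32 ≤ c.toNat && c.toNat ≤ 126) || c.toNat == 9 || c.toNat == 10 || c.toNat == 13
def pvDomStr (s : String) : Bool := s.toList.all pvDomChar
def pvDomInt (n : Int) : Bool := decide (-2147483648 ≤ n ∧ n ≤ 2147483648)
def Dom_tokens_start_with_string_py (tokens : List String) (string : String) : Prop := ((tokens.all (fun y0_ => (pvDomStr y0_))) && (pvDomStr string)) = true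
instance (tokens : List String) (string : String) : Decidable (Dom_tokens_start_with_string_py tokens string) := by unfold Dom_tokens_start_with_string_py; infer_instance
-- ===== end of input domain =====

-- B replaces A's growing concatenation (re-compared against the string each step) with a
-- running position and one slice comparison per token; return values are identical.

-- ===== PORT A =====
-- the loop: accumulate string_to_check, compare to string, else test startswith
def pvGoA (s : List Char) (acc : List Char) (i : Nat) : List String → Int
  | [] => -1
  | t :: rest =>
    let acc' := acc ++ t.toList
    if acc' = s then (i : Int) + 1
    else if PySem.Chars.startswith s acc' then pvGoA s acc' (i + 1) rest
    else -1

def tokens_start_with_string_py (tokens : List String) (string : String) : Int :=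
  pvGoA string.toList [] 0 tokens

-- ===== PORT B =====
-- the loop: running position pos; compare string[pos:pos+len(token)] with the token
def pvGoB (s : List Char) (pos : Nat) (i : Nat) : List String → Int
  | [] => -1
  | t :: rest =>
    let tl := t.toList
    if PySem.List.slice s (some (pos : Int)) (some ((pos : Int) + (tl.length : Int))) ≠ tl then -1
    else if pos + tl.length = s.length then (i : Int) + 1
    else pvGoB s (pos + tl.length) (i + 1) rest

def tokens_start_with_string_py_alt (tokens : List String) (string : String) : Int :=
  pvGoB string.toList 0 0 tokens

-- ===== PRECONDITION & SPEC =====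
def Spec_tokens_start_with_string_py (tokens : List String) (string : String) (out : Int) : Prop := out = tokens_start_with_string_py_alt tokens string
instance (tokens : List String) (string : String) (out : Int) : Decidable (Spec_tokens_start_with_string_py tokens string out) := by unfold Spec_tokens_start_with_string_py; infer_instance

-- ===== CLAIM (what is proved, stated in full; the proofs are below) =====
def Claim_equal_tokens_start_with_string_py : Prop := ∀ (tokens : List String) (string : String), Dom_tokens_start_with_string_py tokens string → Spec_tokens_start_with_string_py tokens string (tokens_start_with_string_py tokens string)

-- ===== LEMMAS AND PROOFS =====

-- loop invariant: A's accumulator is exactly the first `pos` characters of the string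
theorem pvGo_eq (s : List Char) (tokens : List String) :
    ∀ pos i, pos ≤ s.length → pvGoA s (s.take pos) i tokens = pvGoB s pos i tokens := by
  induction tokens with
  | nil => intro pos i _; rfl
  | cons t rest ih =>
    intro pos i hpos
    have hn : t.toList.length = t.length := by simp
    simp only [pvGoA, pvGoB, PySem.List.slice_natCast_add, hn]
    by_cases hc : (s.drop pos).take t.length = t.toList
    · have hle : pos + t.length ≤ s.length := by
        have := congrArg List.length hc
        simp [hn] at this
        omega
      by_cases hend : pos + t.length = s.length
      · have heq : s.take pos ++ t.toList = s := by
          have h2 : (s.drop pos).take t.length = s.drop pos :=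
            List.take_of_length_le (by simp; omega)
          rw [← hc, h2, List.take_append_drop]
        rw [if_pos heq, if_neg (by simp [hc]), if_pos hend]
      · have hne : s.take pos ++ t.toList ≠ s := by
          intro h
          have := congrArg List.length h
          simp [hn] at this
          omega
        have htake : s.take pos ++ t.toList = s.take (pos + t.length) := by
          rw [List.take_add, hc]
        have hpre : PySem.Chars.startswith s (s.take pos ++ t.toList) = true := by
          rw [PySem.Chars.startswith_iff, htake]
          exact List.take_prefix _ _
        rw [if_neg hne, if_pos hpre, if_neg (by simp [hc]), if_neg hend, htake]
        exact ih _ _ hle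
    · have hdrop : ∀ u, s.take pos ++ t.toList ++ u = s → False := by
        intro u h
        apply hc
        have h2 : s.drop pos = t.toList ++ u := by
          have := congrArg (List.drop pos) h
          rw [List.append_assoc, List.drop_left' (by simp; omega)] at this
          exact this.symm
        rw [h2, ← hn, List.take_left]
      have hne : s.take pos ++ t.toList ≠ s := fun h => hdrop [] (by simpa using h)
      have hpre : PySem.Chars.startswith s (s.take pos ++ t.toList) = false := by
        rw [Bool.eq_false_iff]
        intro h
        rw [PySem.Chars.startswith_iff] at h
        obtain ⟨u, hu⟩ := h
        exact hdrop u hu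
      rw [if_neg hne, if_neg (by simp [hpre]), if_pos hc]

-- ===== VERDICT (by name: the statement is the Claim_ definition above) =====
theorem tokens_start_with_string_py_spec : Claim_equal_tokens_start_with_string_py := by
  intro tokens string _
  unfold Spec_tokens_start_with_string_py tokens_start_with_string_py tokens_start_with_string_py_alt
  simpa using pvGo_eq string.toList tokens 0 0 (Nat.zero_le _)
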